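-- pv_equiv track=rewrite | github.com/mnmsgit/ProblemSolving | 백준/Silver/9184. 신나는 함수 실행/신나는 함수 실행.py | w
-- ===== SOURCE A (Python) =====
-- dp = [[[0 for _ in range(51)]for _ in range(51)]for _ in range(51)]
--
-- def w(x, y, z):
--     if x <= 0 or y <= 0 or z <= 0:
--         return 1
--     if x > 20 or y > 20 or z > 20:
--         if dp[20][20][20]:
--             return dp[20][20][20]
--         else:
--             return w(20, 20, 20)
--     if dp[x][y][z]:
--         return dp[x][y][z]
--     if x < y < z:
--         if not dp[x][y][z-1]:
--             dp[x][y][z-1] = w(x, y, z-1)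
--         if not dp[x][y-1][z-1]:
--             dp[x][y-1][z-1] = w(x, y-1, z-1)
--         if not dp[x][y-1][z]:
--             dp[x][y-1][z] = w(x, y-1, z)
--         return dp[x][y][z-1] + dp[x][y-1][z-1] - dp[x][y-1][z]
--     else:
--         if not dp[x-1][y][z]:
--             dp[x-1][y][z] = w(x-1, y, z)
--         if not dp[x-1][y-1][z]:
--             dp[x-1][y-1][z] = w(x-1, y-1, z)
--         if not dp[x-1][y][z-1]:
--             dp[x-1][y][z-1] = w(x-1, y, z-1)
--         if not dp[x-1][y-1][z-1]:
--             dp[x-1][y-1][z-1] = w(x-1, y-1, z-1)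
--         return dp[x-1][y][z] + dp[x-1][y-1][z] + dp[x-1][y][z-1] - dp[x-1][y-1][z-1]
-- ===== SOURCE B (Python) =====
-- # Bottom-up: fill a table for all 0<=x,y,z<=20 once with triple nested loops, then answer by lookup.
-- t = {}
-- for _x in range(21):
--     for _y in range(21):
--         for _z in range(21):
--             if _x == 0 or _y == 0 or _z == 0:
--                 t[(_x, _y, _z)] = 1
--             elif _x < _y < _z:
--                 t[(_x, _y, _z)] = t[(_x, _y, _z-1)] + t[(_x, _y-1, _z-1)] - t[(_x, _y-1, _z)]
--             else:
--                 t[(_x, _y, _z)] = t[(_x-1, _y, _z)] + t[(_x-1, _y-1, _z)] + t[(_x-1, _y, _z-1)] - t[(_x-1, _y-1, _z-1)]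
--
-- def w(x, y, z):
--     if x <= 0 or y <= 0 or z <= 0:
--         return 1
--     if x > 20 or y > 20 or z > 20:
--         return t[(20, 20, 20)]
--     return t[(x, y, z)]
-- ===== Notes on version B (the rewrite author's own statement) =====
-- stated objective: alternative
-- what changed: Replaces A's lazy memoized recursion over a global dp table with a bottom-up table built once by three nested loops in lexicographic order, the function becoming a pure O(1) lookup.
import Mathlib
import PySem

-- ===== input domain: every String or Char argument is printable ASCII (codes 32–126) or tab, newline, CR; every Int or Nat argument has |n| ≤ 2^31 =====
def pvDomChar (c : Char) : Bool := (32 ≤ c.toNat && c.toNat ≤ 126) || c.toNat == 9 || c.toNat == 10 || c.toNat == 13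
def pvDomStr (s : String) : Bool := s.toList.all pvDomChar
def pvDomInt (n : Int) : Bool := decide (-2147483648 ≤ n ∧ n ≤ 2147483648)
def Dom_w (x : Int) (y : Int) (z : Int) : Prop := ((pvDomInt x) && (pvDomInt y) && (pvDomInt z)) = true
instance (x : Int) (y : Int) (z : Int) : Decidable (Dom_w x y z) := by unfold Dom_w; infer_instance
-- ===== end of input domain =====

-- B builds the whole table bottom-up once (triple loop in lexicographic order) and answers by
-- lookup; A memoizes lazily into a global dp (a side effect on module state; the claim is about
-- the RETURN value, which does not depend on the dp state since dp only ever holds values the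
-- recursion itself computes).

-- ===== PORT A =====
-- A's global dp is threaded as an explicit memo state (fresh per top-level call; value-equal to
-- Python's persistent dp because every stored entry equals the recursively computed value).
-- The 51³ nested list with 0-as-unset sentinel is carried as a map keyed by the triple: an entry
-- is present exactly when Python has stored a (computed, hence correct) value there, and
-- 'dp[x][y][z]' reads become '.getD _ 0' (0 = the untouched sentinel).
abbrev Memo : Type := Std.HashMap (Int × Int × Int) Int

-- "if not dp[k]: dp[k] = f(...)" — compute-and-store unless already memoized
def fill (k : Int × Int × Int) (f : Memo → Int × Memo) (m : Memo) : Memo :=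
  match m[k]? with
  | some _ => m
  | none => let r := f m; r.2.insert k r.1

-- the recursive body of A for arguments already clamped away from the >20 branch; 'fuel' is a
-- pure totality device (x+y+z strictly decreases on every recursive call, so with fuel ≥ x+y+z
-- the 0-fuel arm is never reached; Python's recursion has no such counter and needs none)
def wInner (fuel : Nat) (x : Int) (y : Int) (z : Int) (m : Memo) : Int × Memo :=
  match fuel with
  | 0 => (1, m)
  | fuel + 1 =>
  if x ≤ 0 ∨ y ≤ 0 ∨ z ≤ 0 then (1, m)
  else
    match m[(x, y, z)]? with
    | some v => (v, m)
    | none =>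
      if x < y ∧ y < z then
        let m1 := fill (x, y, z - 1) (fun mm => wInner fuel x y (z - 1) mm) m
        let m2 := fill (x, y - 1, z - 1) (fun mm => wInner fuel x (y - 1) (z - 1) mm) m1
        let m3 := fill (x, y - 1, z) (fun mm => wInner fuel x (y - 1) z mm) m2
        (m3.getD (x, y, z - 1) 0 + m3.getD (x, y - 1, z - 1) 0 - m3.getD (x, y - 1, z) 0, m3)
      else
        let m1 := fill (x - 1, y, z) (fun mm => wInner fuel (x - 1) y z mm) m
        let m2 := fill (x - 1, y - 1, z) (fun mm => wInner fuel (x - 1) (y - 1) z mm) m1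
        let m3 := fill (x - 1, y, z - 1) (fun mm => wInner fuel (x - 1) y (z - 1) mm) m2
        let m4 := fill (x - 1, y - 1, z - 1) (fun mm => wInner fuel (x - 1) (y - 1) (z - 1) mm) m3
        (m4.getD (x - 1, y, z) 0 + m4.getD (x - 1, y - 1, z) 0 + m4.getD (x - 1, y, z - 1) 0
            - m4.getD (x - 1, y - 1, z - 1) 0, m4)

-- A's ">20" branch returns w(20,20,20) (dp[20][20][20] if already set, which is the same value)
def w (x : Int) (y : Int) (z : Int) : Int :=
  if x ≤ 0 ∨ y ≤ 0 ∨ z ≤ 0 then 1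
  else if x > 20 ∨ y > 20 ∨ z > 20 then (wInner 60 20 20 20 (∅ : Memo)).1
  else (wInner (x + y + z).toNat x y z (∅ : Memo)).1

-- ===== PORT B =====
-- Source B's dict t keyed by (x,y,z) is ported as a hash map; reads t[(…)] are '.getD _ 0' (exact
-- here: every key read was written by an earlier loop iteration, the default is never taken).
def cellVal (t : Std.HashMap (Int × Int × Int) Int) (x : Int) (y : Int) (z : Int) : Int :=
  if x = 0 ∨ y = 0 ∨ z = 0 then 1
  else if x < y ∧ y < z then
    t.getD (x, y, z - 1) 0 + t.getD (x, y - 1, z - 1) 0 - t.getD (x, y - 1, z) 0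
  else
    t.getD (x - 1, y, z) 0 + t.getD (x - 1, y - 1, z) 0 + t.getD (x - 1, y, z - 1) 0
      - t.getD (x - 1, y - 1, z - 1) 0

def stepZ (x : Int) (y : Int) : Std.HashMap (Int × Int × Int) Int → Int → Std.HashMap (Int × Int × Int) Int := fun t z => t.insert (x, y, z) (cellVal t x y z)

def stepY (x : Int) : Std.HashMap (Int × Int × Int) Int → Int → Std.HashMap (Int × Int × Int) Int := fun t y => (PySem.List.pyRange 0 21 1).foldl (stepZ x y) t

def stepX : Std.HashMap (Int × Int × Int) Int → Int → Std.HashMap (Int × Int × Int) Int := fun t x => (PySem.List.pyRange 0 21 1).foldl (stepY x) t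

def table : Std.HashMap (Int × Int × Int) Int := (PySem.List.pyRange 0 21 1).foldl stepX (∅ : Std.HashMap (Int × Int × Int) Int)

def w_alt (x : Int) (y : Int) (z : Int) : Int :=
  if x ≤ 0 ∨ y ≤ 0 ∨ z ≤ 0 then 1
  else if x > 20 ∨ y > 20 ∨ z > 20 then table.getD (20, 20, 20) 0
  else table.getD (x, y, z) 0

-- ===== PRECONDITION & SPEC =====
def Spec_w (x : Int) (y : Int) (z : Int) (out : Int) : Prop := out = w_alt x y z
instance (x : Int) (y : Int) (z : Int) (out : Int) : Decidable (Spec_w x y z out) := by unfold Spec_w; infer_instance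

-- ===== CLAIM (what is proved, stated in full; the proofs are below) =====
def Claim_equal_w : Prop := ∀ (x : Int) (y : Int) (z : Int), Dom_w x y z → Spec_w x y z (w x y z)

-- ===== LEMMAS AND PROOFS =====

-- the mathematical value of the recurrence (used only in proofs)
def T (x : Int) (y : Int) (z : Int) : Int :=
  if x ≤ 0 ∨ y ≤ 0 ∨ z ≤ 0 then 1
  else if x < y ∧ y < z then T x y (z - 1) + T x (y - 1) (z - 1) - T x (y - 1) z
  else T (x - 1) y z + T (x - 1) (y - 1) z + T (x - 1) y (z - 1) - T (x - 1) (y - 1) (z - 1)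
termination_by (x + y + z).toNat
decreasing_by all_goals omega

def T' (p : Int × Int × Int) : Int := T p.1 p.2.1 p.2.2

def Valid (m : Memo) : Prop := ∀ (p : Int × Int × Int) (v : Int), m[p]? = some v → v = T' p

theorem valid_getD (m : Memo) (p : Int × Int × Int) (hm : Valid m) (hs : m[p]?.isSome) :
    m.getD p 0 = T' p := by
  cases h : m[p]? with
  | none => rw [h] at hs; simp at hs
  | some v => rw [Std.HashMap.getD_eq_getD_getElem?, h, Option.getD_some, hm p v h]

theorem fill_ok (k : Int × Int × Int) (f : Memo → Int × Memo) (m : Memo) (hm : Valid m)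
    (h1 : (f m).1 = T' k) (h2 : Valid (f m).2)
    (h3 : ∀ (p : Int × Int × Int), m[p]?.isSome → ((f m).2)[p]?.isSome) :
    Valid (fill k f m) ∧ (∀ (p : Int × Int × Int), m[p]?.isSome → (fill k f m)[p]?.isSome)
      ∧ (fill k f m)[k]? = some (T' k) := by
  unfold fill
  cases hk : m[k]? with
  | some v =>
    simp only
    refine ⟨hm, fun p hp => hp, ?_⟩
    rw [hk, hm k v hk]
  | none =>
    simp only
    refine ⟨?_, ?_, ?_⟩
    · intro p v hv
      rw [Std.HashMap.getElem?_insert] at hv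
      by_cases hpk : k = p
      · subst hpk
        simp only [BEq.rfl, if_pos] at hv
        rw [← Option.some_inj.mp hv, h1]
      · rw [if_neg (by simp [hpk])] at hv
        exact h2 p v hv
    · intro p hp
      rw [Std.HashMap.getElem?_insert]
      by_cases hpk : k = p
      · simp [hpk]
      · rw [if_neg (by simp [hpk])]
        exact h3 p hp
    · rw [Std.HashMap.getElem?_insert, if_pos (by simp), h1]

theorem wInner_ok : ∀ (n : Nat) (x y z : Int) (m : Memo), (x + y + z).toNat ≤ n → Valid m →
    (wInner n x y z m).1 = T x y z ∧ Valid (wInner n x y z m).2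
      ∧ (∀ (p : Int × Int × Int), m[p]?.isSome → ((wInner n x y z m).2)[p]?.isSome) := by
  intro n
  induction n with
  | zero =>
    intro x y z m hn hm
    have hg : x ≤ 0 ∨ y ≤ 0 ∨ z ≤ 0 := by omega
    simp only [wInner]
    rw [T]
    simp only [if_pos hg]
    exact ⟨by trivial, hm, fun p hp => hp⟩
  | succ n IH =>
    intro x y z m hn hm
    simp only [wInner]
    rw [T]
    by_cases hg : x ≤ 0 ∨ y ≤ 0 ∨ z ≤ 0
    · simp only [if_pos hg]
      exact ⟨by trivial, hm, fun p hp => hp⟩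
    · simp only [if_neg hg]
      cases hx : m[((x : Int), (y : Int), (z : Int))]? with
      | some v =>
        refine ⟨?_, hm, fun p hp => hp⟩
        have := hm (x, y, z) v hx
        simp [T'] at this
        rw [this, T, if_neg hg]
      | none =>
        by_cases hb : x < y ∧ y < z
        · simp only [if_pos hb]
          have I1 : _ := IH x y (z - 1) m (by omega) hm
          have F1 := fill_ok (x, y, z - 1) (fun mm => wInner n x y (z - 1) mm) m hm I1.1 I1.2.1 I1.2.2
          set m1 := fill (x, y, z - 1) (fun mm => wInner n x y (z - 1) mm) m with hm1
          have I2 : _ := IH x (y - 1) (z - 1) m1 (by omega) F1.1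
          have F2 := fill_ok (x, y - 1, z - 1) (fun mm => wInner n x (y - 1) (z - 1) mm) m1 F1.1 I2.1 I2.2.1 I2.2.2
          set m2 := fill (x, y - 1, z - 1) (fun mm => wInner n x (y - 1) (z - 1) mm) m1 with hm2
          have I3 : _ := IH x (y - 1) z m2 (by omega) F2.1
          have F3 := fill_ok (x, y - 1, z) (fun mm => wInner n x (y - 1) z mm) m2 F2.1 I3.1 I3.2.1 I3.2.2
          set m3 := fill (x, y - 1, z) (fun mm => wInner n x (y - 1) z mm) m2 with hm3
          have g1 : m3.getD (x, y, z - 1) 0 = T' (x, y, z - 1) := by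
            apply valid_getD _ _ F3.1
            apply F3.2.1; apply F2.2.1
            rw [F1.2.2]; simp
          have g2 : m3.getD (x, y - 1, z - 1) 0 = T' (x, y - 1, z - 1) := by
            apply valid_getD _ _ F3.1
            apply F3.2.1; rw [F2.2.2]; simp
          have g3 : m3.getD (x, y - 1, z) 0 = T' (x, y - 1, z) := by
            apply valid_getD _ _ F3.1
            rw [F3.2.2]; simp
          refine ⟨?_, F3.1, fun p hp => F3.2.1 p (F2.2.1 p (F1.2.1 p hp))⟩
          rw [g1, g2, g3]
          simp [T']
        · simp only [if_neg hb]
          have I1 : _ := IH (x - 1) y z m (by omega) hm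
          have F1 := fill_ok (x - 1, y, z) (fun mm => wInner n (x - 1) y z mm) m hm I1.1 I1.2.1 I1.2.2
          set m1 := fill (x - 1, y, z) (fun mm => wInner n (x - 1) y z mm) m with hm1
          have I2 : _ := IH (x - 1) (y - 1) z m1 (by omega) F1.1
          have F2 := fill_ok (x - 1, y - 1, z) (fun mm => wInner n (x - 1) (y - 1) z mm) m1 F1.1 I2.1 I2.2.1 I2.2.2
          set m2 := fill (x - 1, y - 1, z) (fun mm => wInner n (x - 1) (y - 1) z mm) m1 with hm2
          have I3 : _ := IH (x - 1) y (z - 1) m2 (by omega) F2.1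
          have F3 := fill_ok (x - 1, y, z - 1) (fun mm => wInner n (x - 1) y (z - 1) mm) m2 F2.1 I3.1 I3.2.1 I3.2.2
          set m3 := fill (x - 1, y, z - 1) (fun mm => wInner n (x - 1) y (z - 1) mm) m2 with hm3
          have I4 : _ := IH (x - 1) (y - 1) (z - 1) m3 (by omega) F3.1
          have F4 := fill_ok (x - 1, y - 1, z - 1) (fun mm => wInner n (x - 1) (y - 1) (z - 1) mm) m3 F3.1 I4.1 I4.2.1 I4.2.2
          set m4 := fill (x - 1, y - 1, z - 1) (fun mm => wInner n (x - 1) (y - 1) (z - 1) mm) m3 with hm4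
          have g1 : m4.getD (x - 1, y, z) 0 = T' (x - 1, y, z) := by
            apply valid_getD _ _ F4.1
            apply F4.2.1; apply F3.2.1; apply F2.2.1
            rw [F1.2.2]; simp
          have g2 : m4.getD (x - 1, y - 1, z) 0 = T' (x - 1, y - 1, z) := by
            apply valid_getD _ _ F4.1
            apply F4.2.1; apply F3.2.1
            rw [F2.2.2]; simp
          have g3 : m4.getD (x - 1, y, z - 1) 0 = T' (x - 1, y, z - 1) := by
            apply valid_getD _ _ F4.1
            apply F4.2.1; rw [F3.2.2]; simp
          have g4 : m4.getD (x - 1, y - 1, z - 1) 0 = T' (x - 1, y - 1, z - 1) := by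
            apply valid_getD _ _ F4.1
            rw [F4.2.2]; simp
          refine ⟨?_, F4.1, fun p hp => F4.2.1 p (F3.2.1 p (F2.2.1 p (F1.2.1 p hp)))⟩
          rw [g1, g2, g3, g4]
          simp [T']

theorem valid_empty : Valid (∅ : Memo) := by intro p v hv; simp at hv

theorem w_eq_T (x y z : Int) :
    w x y z = if x ≤ 0 ∨ y ≤ 0 ∨ z ≤ 0 then 1
      else if x > 20 ∨ y > 20 ∨ z > 20 then T 20 20 20 else T x y z := by
  unfold w
  split_ifs with h1 h2
  · rfl
  · exact (wInner_ok 60 20 20 20 _ (by omega) valid_empty).1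
  · exact (wInner_ok ((x + y + z)).toNat x y z _ (le_refl _) valid_empty).1

-- ===== B-side: the bottom-up table equals T on all filled cells =====

def DoneP (X Y Z a b c : Int) : Prop :=
  0 ≤ a ∧ a ≤ 20 ∧ 0 ≤ b ∧ b ≤ 20 ∧ 0 ≤ c ∧ c ≤ 20 ∧
    (a < X ∨ (a = X ∧ (b < Y ∨ (b = Y ∧ c < Z))))

def Good (t : Std.HashMap (Int × Int × Int) Int) (X Y Z : Int) : Prop :=
  ∀ a b c, DoneP X Y Z a b c → t.getD (a, b, c) 0 = T a b c

theorem cell_ok (t : Std.HashMap (Int × Int × Int) Int) (X Y Z : Int) (hX : 0 ≤ X ∧ X ≤ 20) (hY : 0 ≤ Y ∧ Y ≤ 20)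
    (hZ : 0 ≤ Z ∧ Z ≤ 20) (h : Good t X Y Z) : cellVal t X Y Z = T X Y Z := by
  rw [cellVal, T]
  by_cases h0 : X = 0 ∨ Y = 0 ∨ Z = 0
  · rw [if_pos h0, if_pos (by omega)]
  · rw [if_neg h0, if_neg (by omega : ¬(X ≤ 0 ∨ Y ≤ 0 ∨ Z ≤ 0))]
    by_cases hb : X < Y ∧ Y < Z
    · rw [if_pos hb, if_pos hb,
        h X Y (Z - 1) (by unfold DoneP; omega),
        h X (Y - 1) (Z - 1) (by unfold DoneP; omega),
        h X (Y - 1) Z (by unfold DoneP; omega)]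
    · rw [if_neg hb, if_neg hb,
        h (X - 1) Y Z (by unfold DoneP; omega),
        h (X - 1) (Y - 1) Z (by unfold DoneP; omega),
        h (X - 1) Y (Z - 1) (by unfold DoneP; omega),
        h (X - 1) (Y - 1) (Z - 1) (by unfold DoneP; omega)]

theorem good_mono (t : Std.HashMap (Int × Int × Int) Int) (X Y Z X' Y' Z' : Int)
    (himp : ∀ a b c, DoneP X' Y' Z' a b c → DoneP X Y Z a b c)
    (h : Good t X Y Z) : Good t X' Y' Z' :=
  fun a b c hp => h a b c (himp a b c hp)

theorem loopZ_ok (X Y : Int) (hX : 0 ≤ X ∧ X ≤ 20) (hY : 0 ≤ Y ∧ Y ≤ 20) :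
    ∀ (k : Nat) (Z : Int) (t : Std.HashMap (Int × Int × Int) Int), 0 ≤ Z → Z + (k : Int) = 21 → Good t X Y Z →
      Good ((PySem.List.pyRange Z 21 1).foldl (stepZ X Y) t) X Y 21 := by
  intro k
  induction k with
  | zero =>
    intro Z t h0 hk ht
    rw [PySem.List.pyRange_one_eq_nil (by omega)]
    simpa [(by omega : Z = 21)] using ht
  | succ k IH =>
    intro Z t h0 hk ht
    rw [PySem.List.pyRange_one_cons (by omega)]
    simp only [List.foldl_cons]
    apply IH (Z + 1) _ (by omega) (by omega)
    intro a b c hp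
    show (t.insert (X, Y, Z) (cellVal t X Y Z)).getD (a, b, c) 0 = T a b c
    rw [Std.HashMap.getD_insert]
    by_cases hpk : ((X : Int), (Y : Int), (Z : Int)) = ((a : Int), (b : Int), (c : Int))
    · rw [if_pos (by simp [hpk])]
      obtain ⟨h1, h2, h3⟩ : X = a ∧ Y = b ∧ Z = c := by
        simpa [Prod.ext_iff] using hpk
      subst h1; subst h2; subst h3
      exact cell_ok t X Y Z hX hY (by unfold DoneP at hp; omega) ht
    · rw [if_neg (by simp [hpk])]
      apply ht
      have hne : ¬(a = X ∧ b = Y ∧ c = Z) := by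
        intro hh
        exact hpk (by simp [hh.1, hh.2.1, hh.2.2])
      unfold DoneP at hp ⊢; omega

theorem loopY_ok (X : Int) (hX : 0 ≤ X ∧ X ≤ 20) :
    ∀ (k : Nat) (Y : Int) (t : Std.HashMap (Int × Int × Int) Int), 0 ≤ Y → Y + (k : Int) = 21 → Good t X Y 0 →
      Good ((PySem.List.pyRange Y 21 1).foldl (stepY X) t) X 21 0 := by
  intro k
  induction k with
  | zero =>
    intro Y t h0 hk ht
    rw [PySem.List.pyRange_one_eq_nil (by omega)]
    simpa [(by omega : Y = 21)] using ht
  | succ k IH =>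
    intro Y t h0 hk ht
    rw [PySem.List.pyRange_one_cons (by omega)]
    simp only [List.foldl_cons]
    apply IH (Y + 1) _ (by omega) (by omega)
    show Good ((PySem.List.pyRange 0 21 1).foldl (stepZ X Y) t) X (Y + 1) 0
    apply good_mono _ X Y 21 X (Y + 1) 0 (fun a b c hp => by unfold DoneP at hp ⊢; omega)
    exact loopZ_ok X Y hX (by omega) 21 0 t (by omega) (by omega) ht

theorem loopX_ok :
    ∀ (k : Nat) (X : Int) (t : Std.HashMap (Int × Int × Int) Int), 0 ≤ X → X + (k : Int) = 21 → Good t X 0 0 →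
      Good ((PySem.List.pyRange X 21 1).foldl stepX t) 21 0 0 := by
  intro k
  induction k with
  | zero =>
    intro X t h0 hk ht
    rw [PySem.List.pyRange_one_eq_nil (by omega)]
    simpa [(by omega : X = 21)] using ht
  | succ k IH =>
    intro X t h0 hk ht
    rw [PySem.List.pyRange_one_cons (by omega)]
    simp only [List.foldl_cons]
    apply IH (X + 1) _ (by omega) (by omega)
    show Good ((PySem.List.pyRange 0 21 1).foldl (stepY X) t) (X + 1) 0 0
    apply good_mono _ X 21 0 (X + 1) 0 0 (fun a b c hp => by unfold DoneP at hp ⊢; omega)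
    exact loopY_ok X (by omega) 21 0 t (by omega) (by omega) ht

theorem table_eq_T (a b c : Int) (ha : 0 ≤ a ∧ a ≤ 20) (hb : 0 ≤ b ∧ b ≤ 20)
    (hc : 0 ≤ c ∧ c ≤ 20) : table.getD (a, b, c) 0 = T a b c := by
  have h : Good table 21 0 0 := by
    unfold table
    apply loopX_ok 21 0 _ (by omega) (by omega)
    intro a' b' c' hp
    unfold DoneP at hp; omega
  exact h a b c (by unfold DoneP; omega)

-- ===== VERDICT (by name: the statement is the Claim_ definition above) =====
theorem w_spec : Claim_equal_w := by
  intro x y z _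
  unfold Spec_w w_alt
  rw [w_eq_T]
  split_ifs with h1 h2
  · rfl
  · exact (table_eq_T 20 20 20 (by omega) (by omega) (by omega)).symm
  · exact (table_eq_T x y z (by omega) (by omega) (by omega)).symm
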